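-- pv_equiv track=rewrite | github.com/riadath/socket_programming_python | socket_2/server_client/task2_sample/server_rdi.py | skipUntilDoc
-- ===== SOURCE A (Python) =====
-- def skipUntilDoc(string):
--     list = string.split('\n')
--     flag = False
--     ans = ''
--     for line in list:
--         listItem = line.split(' ', maxsplit=1)
--         if (listItem[0].lower().startswith('<html')):
--             flag = True
--         if(flag):
--            ans += line + '\n'
--
--     return ans
-- ===== SOURCE B (Python) =====
-- def skipUntilDoc(string):
--     lines = string.split('\n')
--     for i, line in enumerate(lines):
--         if line.split(' ', 1)[0].lower().startswith('<html'):
--             return '\n'.join(lines[i:]) + '\n'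
--     return ''
-- ===== Notes on version B (the rewrite author's own statement) =====
-- stated objective: simpler
-- what changed: Replaces the flag-and-accumulate single pass with locating the first line whose first space-delimited token starts the html tag and bulk-joining the remaining lines in one step.
import Mathlib
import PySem

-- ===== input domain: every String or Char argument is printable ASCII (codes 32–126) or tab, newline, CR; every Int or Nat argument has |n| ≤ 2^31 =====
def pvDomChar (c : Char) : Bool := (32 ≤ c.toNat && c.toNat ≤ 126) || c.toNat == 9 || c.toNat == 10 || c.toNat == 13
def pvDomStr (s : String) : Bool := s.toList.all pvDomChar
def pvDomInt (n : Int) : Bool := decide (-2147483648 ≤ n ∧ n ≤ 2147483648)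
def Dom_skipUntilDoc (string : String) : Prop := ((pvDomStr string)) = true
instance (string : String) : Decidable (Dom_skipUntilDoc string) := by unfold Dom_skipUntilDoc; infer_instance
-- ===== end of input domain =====

-- B replaces A's flag-and-accumulate pass with locate-first-matching-line then bulk-join of the tail (simpler decomposition; same token test).

-- ===== PORT A =====
-- the shared token test: line.split(' ', maxsplit=1)[0].lower().startswith('<html')
def pvTest (line : String) : Bool :=
  let listItem := (PySem.Str.splitMax? line " " 1).getD []
  PySem.Str.startswith (PySem.Str.lower (listItem.headD "")) "<html"

-- A's loop body over state (flag, ans)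
def pvStepA (st : Bool × String) (line : String) : Bool × String :=
  let flag := if pvTest line then true else st.1
  let ans := if flag then st.2 ++ line ++ "\n" else st.2
  (flag, ans)

def skipUntilDoc (string : String) : String :=
  let list := (PySem.Str.split? string "\n").getD []
  (list.foldl pvStepA (false, "")).2

-- ===== PORT B =====
def skipUntilDoc_alt (string : String) : String :=
  let lines := (PySem.Str.split? string "\n").getD []
  match lines.findIdx? pvTest with
  | some i => PySem.Str.join "\n" (lines.drop i) ++ "\n"
  | none => ""

-- ===== PRECONDITION & SPEC =====
def Spec_skipUntilDoc (string : String) (out : String) : Prop := out = skipUntilDoc_alt string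
instance (string : String) (out : String) : Decidable (Spec_skipUntilDoc string out) := by unfold Spec_skipUntilDoc; infer_instance

-- ===== CLAIM (what is proved, stated in full; the proofs are below) =====
def Claim_equal_skipUntilDoc : Prop := ∀ (string : String), Dom_skipUntilDoc string → Spec_skipUntilDoc string (skipUntilDoc string)

-- ===== LEMMAS AND PROOFS =====

-- what A accumulates once the flag is set: every remaining line followed by '\n'
def pvGlue : List String → String
  | [] => ""
  | l :: ls => l ++ "\n" ++ pvGlue ls

theorem pv_fold_true (ls : List String) : ∀ ans, List.foldl pvStepA (true, ans) ls = (true, ans ++ pvGlue ls) := by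
  induction ls with
  | nil => intro ans; simp [pvGlue]
  | cons l ls ih =>
      intro ans
      simp only [List.foldl_cons, pvStepA, pvGlue]
      have h : (if pvTest l then true else true) = true := by split <;> rfl
      rw [h]
      simp [ih, String.append_assoc]

theorem pv_fold_false (ls : List String) : ∀ ans,
    (List.foldl pvStepA (false, ans) ls).2
      = ans ++ (match ls.findIdx? pvTest with
                | some i => pvGlue (ls.drop i)
                | none => "") := by
  induction ls with
  | nil => intro ans; simp [List.findIdx?_nil]
  | cons l ls ih =>
      intro ans
      by_cases h : pvTest l = true
      · simp [List.foldl_cons, pvStepA, h, pv_fold_true, List.findIdx?_cons, pvGlue, String.append_assoc]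
      · simp only [List.foldl_cons, pvStepA, h, if_neg, Bool.false_eq_true, not_false_iff, ih]
        simp [List.findIdx?_cons, h]
        cases hf : ls.findIdx? pvTest <;> simp

theorem pv_join_glue (l : String) (ls : List String) :
    PySem.Str.join "\n" (l :: ls) ++ "\n" = pvGlue (l :: ls) := by
  induction ls generalizing l with
  | nil =>
      rw [← String.toList_inj]
      simp [PySem.Str.join, PySem.Chars.join, List.intercalate, pvGlue]
  | cons m ms ih =>
      have h2 := congrArg String.toList (ih m)
      rw [← String.toList_inj]
      simp only [String.toList_append, PySem.Str.toList_join, List.map_cons] at h2 ⊢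
      rw [PySem.Chars.join_cons_cons]
      simp only [pvGlue, String.toList_append] at h2 ⊢
      simp at h2
      simp [h2]

-- ===== VERDICT (by name: the statement is the Claim_ definition above) =====
theorem skipUntilDoc_spec : Claim_equal_skipUntilDoc := by
  intro s _
  unfold Spec_skipUntilDoc skipUntilDoc skipUntilDoc_alt
  simp only []
  set lines := (PySem.Str.split? s "\n").getD [] with hl
  rw [pv_fold_false]
  cases hf : lines.findIdx? pvTest with
  | none => simp
  | some i =>
      have hi : i < lines.length := by
        have := List.findIdx?_eq_some_iff_findIdx_eq.mp hf
        exact this.1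
      have hne : lines.drop i ≠ [] := by
        intro h
        have := List.drop_eq_nil_iff.mp h
        omega
      obtain ⟨a, as, hd⟩ : ∃ a as, lines.drop i = a :: as := by
        cases hd' : lines.drop i with
        | nil => exact absurd hd' hne
        | cons a as => exact ⟨a, as, rfl⟩
      simp [hd, ← pv_join_glue]
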